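-- pv_equiv track=rewrite | github.com/VerstraeteBert/algos-ds | test/vraag4/src/synoniemen/49.py | synoniemen
-- ===== SOURCE A (Python) =====
-- def synoniemen(tekst, woordenboek):
--     t = tekst.split(' ')
--     for i in woordenboek:
--         for j in range(len(t)):
--             if i == t[j]:
--                 t.remove(t[j])
--                 t.insert(j, woordenboek[i])
--     z = ' '.join(t)
--     return z
-- ===== SOURCE B (Python) =====
-- def synoniemen(tekst, woordenboek):
--     # Precompute each key's final chained image with one reverse pass over the
--     # dict, then map every word through that table in a single pass.
--     final = {}
--     for k, v in reversed(list(woordenboek.items())):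
--         final[k] = final.get(v, v)
--     return ' '.join(final.get(w, w) for w in tekst.split(' '))
-- ===== Notes on version B (the rewrite author's own statement) =====
-- stated objective: alternative
-- what changed: Instead of one remove/insert index scan of the word list per dictionary entry, B precomputes every key's final chained image with a single reverse pass over the dict and then maps each word through that table in one pass.
-- outside the precondition, e.g. on synoniemen(' a ', {'': ''}): A returns 'a  ', B returns ' a '; on synoniemen('b x a', {'b': 'a', 'a': 'a'}): A returns 'x a a', B returns 'a x a'
import Mathlib
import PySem

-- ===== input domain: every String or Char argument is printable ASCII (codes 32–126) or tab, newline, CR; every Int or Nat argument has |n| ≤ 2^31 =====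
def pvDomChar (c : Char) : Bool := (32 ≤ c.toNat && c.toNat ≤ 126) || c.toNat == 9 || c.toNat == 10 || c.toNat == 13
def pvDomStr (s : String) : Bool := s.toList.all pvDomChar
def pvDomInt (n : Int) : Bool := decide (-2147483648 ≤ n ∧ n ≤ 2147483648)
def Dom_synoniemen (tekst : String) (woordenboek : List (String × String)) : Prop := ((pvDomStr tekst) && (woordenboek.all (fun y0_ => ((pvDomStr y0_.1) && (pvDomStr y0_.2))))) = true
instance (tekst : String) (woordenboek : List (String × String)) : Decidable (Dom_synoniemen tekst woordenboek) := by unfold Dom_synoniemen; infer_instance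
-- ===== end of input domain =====

-- B replaces A's per-entry index scan with remove/reinsert by one reverse pass over the dict that
-- precomputes every key's final chained image, then a single lookup pass over the words.

-- ===== PORT A =====
-- one pass of A's inner loop: 'for j in range(len(t)): if i == t[j]: t.remove(t[j]); t.insert(j, woordenboek[i])'
def synPass (k v : String) (t0 : List String) : List String :=
  (List.range t0.length).foldl (fun (t : List String) (j : Nat) =>
    match PySem.List.pyGet? t (j : Int) with
    | none => t              -- unreachable guard: j < len(t) throughout the pass
    | some w =>
      if k = w then
        PySem.List.insert ((PySem.List.remove? t w).getD t) (j : Int) v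
      else t) t0

def synoniemen (tekst : String) (woordenboek : List (String × String)) : String :=
  let t0 := (PySem.Str.split? tekst " ").getD [tekst]   -- sep " " ≠ "", so split? is always some
  PySem.Str.join " " (woordenboek.foldl (fun t kv => synPass kv.1 kv.2 t) t0)

-- ===== PORT B =====
def synoniemen_alt (tekst : String) (woordenboek : List (String × String)) : String :=
  let final := woordenboek.reverse.foldl
      (fun d kv => PySem.Dict.insert d kv.1 (PySem.Dict.getD d kv.2 kv.2))
      (PySem.Dict.empty : PySem.Dict String String)
  let words := (PySem.Str.split? tekst " ").getD [tekst]
  PySem.Str.join " " (words.map (fun w => PySem.Dict.getD final w w))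

-- ===== PRECONDITION & SPEC =====
-- word w could still equal k by the time entry (k, k) is processed: it is k already, or it is a
-- key of the dict and some other entry's value is k (a chain of earlier substitutions may have
-- rewritten it to k)
def pvCap (wb : List (String × String)) (k w : String) : Bool :=
  w == k || ((wb.any (fun q => q.1 == w)) && wb.any (fun q => q.2 == k && q.1 != k))
-- some word ≠ k has, on both sides of it, a word that could equal k when entry (k, k) is processed
def pvHasPat (wb : List (String × String)) (k : String) (ws : List String) : Bool :=
  (List.range ws.length).any (fun j =>
    (ws.getD j "" != k) && ((ws.take j).any (pvCap wb k)) && ((ws.drop (j+1)).any (pvCap wb k)))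

-- Pre_ excludes dictionaries with duplicate keys (a Python dict cannot hold them), and inputs where
-- an identity entry k→k can apply to two occurrences of k separated by another word: there A's
-- remove-first/re-insert accidentally PERMUTES the words of the text (an artefact of its
-- implementation), while B leaves every word in place.
def Pre_synoniemen (tekst : String) (woordenboek : List (String × String)) : Prop :=
  (woordenboek.map Prod.fst).Nodup ∧
  ∀ p ∈ woordenboek, p.1 = p.2 →
    pvHasPat woordenboek p.1 ((PySem.Str.split? tekst " ").getD [tekst]) = false
instance (tekst : String) (woordenboek : List (String × String)) : Decidable (Pre_synoniemen tekst woordenboek) := by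
  unfold Pre_synoniemen; infer_instance

def pvWitness_synoniemen : String × (List (String × String)) := ("ab cd ab", [("ab", "cd"), ("cd", "x")])

def Spec_synoniemen (tekst : String) (woordenboek : List (String × String)) (out : String) : Prop := out = synoniemen_alt tekst woordenboek
instance (tekst : String) (woordenboek : List (String × String)) (out : String) : Decidable (Spec_synoniemen tekst woordenboek out) := by unfold Spec_synoniemen; infer_instance

-- ===== CLAIM (what is proved, stated in full; the proofs are below) =====
def Claim_equal_synoniemen : Prop := ∀ (tekst : String) (woordenboek : List (String × String)), Dom_synoniemen tekst woordenboek → Pre_synoniemen tekst woordenboek → Spec_synoniemen tekst woordenboek (synoniemen tekst woordenboek)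

-- ===== LEMMAS AND PROOFS =====

-- the image of a word under the entries of l, applied in order (one substitution per entry)
def pvChase : List (String × String) → String → String
  | [], w => w
  | (k, v) :: rest, w => pvChase rest (if w = k then v else w)

def pvSub (k v w : String) : String := if w = k then v else w

-- a pattern k … (≠ k) … k inside a list
def pvPat (u : List String) (k : String) : Prop :=
  ∃ p m q : Nat, p < m ∧ m < q ∧ u[p]? = some k ∧ (∃ w, u[m]? = some w ∧ w ≠ k) ∧ u[q]? = some k

theorem pvChase_append_singleton (l : List (String × String)) (k v w : String) :
    pvChase (l ++ [(k, v)]) w = pvSub k v (pvChase l w) := by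
  induction l generalizing w with
  | nil => rfl
  | cons p rest ih => cases p; simp only [List.cons_append, pvChase]; exact ih _

theorem pvChase_of_not_key (l : List (String × String)) (k : String)
    (h : ∀ q ∈ l, q.1 ≠ k) : pvChase l k = k := by
  induction l with
  | nil => rfl
  | cons p rest ih =>
    cases p with | mk a b =>
    have ha : a ≠ k := h (a, b) List.mem_cons_self
    have hne : ¬ (k = a) := fun hk => ha hk.symm
    simp only [pvChase, if_neg hne]
    exact ih (fun q hq => h q (List.mem_cons_of_mem _ hq))

theorem pvChase_eq_of_ne (l : List (String × String)) (w k : String)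
    (hw : w ≠ k) (h : pvChase l w = k) :
    (∃ q ∈ l, q.1 = w) ∧ ∃ q ∈ l, q.2 = k ∧ q.1 ≠ k := by
  induction l generalizing w with
  | nil => exact absurd h hw
  | cons p rest ih =>
    obtain ⟨a, b⟩ := p
    simp only [pvChase] at h
    by_cases hwa : w = a
    · subst hwa
      rw [if_pos rfl] at h
      refine ⟨⟨(w, b), List.mem_cons_self, rfl⟩, ?_⟩
      by_cases hbk : b = k
      · exact ⟨(w, b), List.mem_cons_self, hbk, hw⟩
      · obtain ⟨_, ⟨q, hq, hq2⟩⟩ := ih b hbk h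
        exact ⟨q, List.mem_cons_of_mem _ hq, hq2⟩
    · rw [if_neg hwa] at h
      obtain ⟨⟨q1, hq1, hq1e⟩, ⟨q2, hq2, hq2e⟩⟩ := ih w hw h
      exact ⟨⟨q1, List.mem_cons_of_mem _ hq1, hq1e⟩, ⟨q2, List.mem_cons_of_mem _ hq2, hq2e⟩⟩

theorem pvPat_cons (a k : String) (u : List String) (h : pvPat u k) : pvPat (a :: u) k := by
  obtain ⟨p, m, q, h1, h2, h3, ⟨w, h4, h5⟩, h6⟩ := h
  exact ⟨p+1, m+1, q+1, by omega, by omega, by simpa using h3, ⟨w, by simpa using h4, h5⟩, by simpa using h6⟩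

theorem pvNoPat_cons_block (k : String) (t : List String) (h : ¬ pvPat (k :: t) k) :
    ∃ n ys, k :: t = List.replicate n k ++ ys ∧ k ∉ ys := by
  induction t with
  | nil => exact ⟨1, [], rfl, by simp⟩
  | cons b t' ih =>
    by_cases hbk : b = k
    · subst hbk
      obtain ⟨n, ys, he, hys⟩ := ih (by
        intro hp
        -- pvPat (k :: t') k → pvPat (k :: k :: t') k by shifting indices ≥ 1
        exact h (by
          obtain ⟨p, m, q, h1, h2, h3, ⟨w, h4, h5⟩, h6⟩ := hp
          cases p with
          | zero =>
            exact ⟨0, m+1, q+1, by omega, by omega, by simp,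
              ⟨w, by rw [List.getElem?_cons_succ]; exact h4, h5⟩,
              by rw [List.getElem?_cons_succ]; exact h6⟩
          | succ p =>
            exact ⟨p+2, m+1, q+1, by omega, by omega,
              by rw [List.getElem?_cons_succ]; exact h3,
              ⟨w, by rw [List.getElem?_cons_succ]; exact h4, h5⟩,
              by rw [List.getElem?_cons_succ]; exact h6⟩))
      exact ⟨n+1, ys, by simp [List.replicate_succ, he], hys⟩
    · refine ⟨1, b :: t', rfl, ?_⟩
      intro hmem
      rcases List.mem_cons.mp hmem with h1 | h2
      · exact hbk h1.symm
      · obtain ⟨i, hi, hie⟩ := List.getElem_of_mem h2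
        refine h ⟨0, 1, i + 2, by omega, by omega, by simp, ⟨b, by simp, hbk⟩, ?_⟩
        rw [List.getElem?_cons_succ, List.getElem?_cons_succ, List.getElem?_eq_getElem hi, hie]

theorem pvNoPat_decomp (u : List String) (k : String) (h : ¬ pvPat u k) :
    ∃ xs n ys, u = xs ++ List.replicate n k ++ ys ∧ k ∉ xs ∧ k ∉ ys := by
  induction u with
  | nil => exact ⟨[], 0, [], rfl, by simp, by simp⟩
  | cons a u' ih =>
    by_cases hak : a = k
    · subst hak
      obtain ⟨n, ys, he, hys⟩ := pvNoPat_cons_block a _ h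
      exact ⟨[], n, ys, he, by simp, hys⟩
    · obtain ⟨xs, n, ys, he, hxs, hys⟩ := ih (fun hp => h (pvPat_cons a k u' hp))
      refine ⟨a :: xs, n, ys, by simp [he], ?_, hys⟩
      intro hm
      rcases List.mem_cons.mp hm with h1 | h2
      · exact hak h1.symm
      · exact hxs h2

theorem pvRemove_append (A rest : List String) (k : String) (hA : k ∉ A) :
    PySem.List.remove? (A ++ k :: rest) k = some (A ++ rest) := by
  induction A with
  | nil => simp [PySem.List.remove?_cons_self]
  | cons a A ih =>
    have ha : a ≠ k := fun h => hA (h ▸ List.mem_cons_self)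
    rw [List.cons_append, PySem.List.remove?_cons_of_ne _ ha,
      ih (fun h => hA (List.mem_cons_of_mem _ h))]
    rfl

theorem pvFoldl_const {α β : Type} (f : α → β → α) (u : α) (l : List β)
    (h : ∀ j ∈ l, f u j = u) : l.foldl f u = u := by
  induction l with
  | nil => rfl
  | cons x l ih => rw [List.foldl_cons, h x List.mem_cons_self]; exact ih (fun j hj => h j (List.mem_cons_of_mem _ hj))

theorem pvSub_ne (k v w : String) (hkv : v ≠ k) : pvSub k v w ≠ k := by
  unfold pvSub; split
  · exact hkv
  · assumption

theorem synPass_map (k v : String) (u : List String) (hkv : v ≠ k) :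
    synPass k v u = u.map (pvSub k v) := by
  have key : ∀ j ≤ u.length, (List.range j).foldl (fun (t : List String) (j : Nat) =>
      match PySem.List.pyGet? t (j : Int) with
      | none => t
      | some w =>
        if k = w then
          PySem.List.insert ((PySem.List.remove? t w).getD t) (j : Int) v
        else t) u = (u.take j).map (pvSub k v) ++ u.drop j := by
    intro j hj
    induction j with
    | zero => simp
    | succ j ih =>
      have hj' : j < u.length := by omega
      rw [List.range_succ, List.foldl_append, ih (by omega)]
      set A : List String := (u.take j).map (pvSub k v) with hA
      have hAlen : A.length = j := by
        simp [hA, List.length_take, Nat.min_eq_left (Nat.le_of_lt hj')]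
      have hdrop : u.drop j = u[j] :: u.drop (j+1) := List.drop_eq_getElem_cons hj'
      have hget : PySem.List.pyGet? (A ++ u.drop j) (j : Int) = some u[j] := by
        rw [PySem.List.pyGet?_natCast, hdrop,
          List.getElem?_append_right (by omega : A.length ≤ j)]
        simp [hAlen]
      simp only [List.foldl_cons, List.foldl_nil, hget]
      by_cases hk : k = u[j]
      · rw [if_pos hk]
        have hnA : k ∉ A := by
          intro hmem
          obtain ⟨x, _, hx⟩ := List.mem_map.mp (hA ▸ hmem)
          exact pvSub_ne k v x hkv hx
        have hrem : PySem.List.remove? (A ++ u.drop j) u[j] = some (A ++ u.drop (j+1)) := by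
          rw [hdrop, ← hk]
          exact pvRemove_append A _ k hnA
        rw [hrem]
        simp only [Option.getD_some]
        have hins : PySem.List.insert (A ++ u.drop (j+1)) (j : Int) v
            = A ++ v :: u.drop (j+1) := by
          have hle : j ≤ (A ++ u.drop (j+1)).length := by
            simp [hAlen]
          rw [PySem.List.insert_natCast _ _ _ hle, ← hAlen, List.take_left, List.drop_left]
        rw [hins, List.take_add_one, List.getElem?_eq_getElem hj']
        simp only [Option.toList_some, List.map_append, List.map_cons, List.map_nil]
        rw [List.append_assoc, List.singleton_append]
        congr 2
        simp only [pvSub]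
        rw [if_pos hk.symm]
      · rw [if_neg hk, hdrop, List.take_add_one, List.getElem?_eq_getElem hj']
        simp only [Option.toList_some, List.map_append, List.map_cons, List.map_nil]
        rw [List.append_assoc, List.singleton_append]
        congr 2
        simp only [pvSub]
        rw [if_neg (fun h => hk h.symm)]
  have := key u.length (Nat.le_refl _)
  unfold synPass
  rw [this]
  simp

theorem synPass_id (k : String) (xs ys : List String) (n : Nat)
    (hxs : k ∉ xs) (hys : k ∉ ys) :
    synPass k k (xs ++ List.replicate n k ++ ys) = xs ++ List.replicate n k ++ ys := by
  set u : List String := xs ++ List.replicate n k ++ ys with hu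
  unfold synPass
  refine pvFoldl_const _ u _ (fun j hj => ?_)
  have hjlen : j < u.length := List.mem_range.mp hj
  cases hget : PySem.List.pyGet? u (j : Int) with
  | none => rfl
  | some w =>
    simp only []
    by_cases hk : k = w
    · subst hk
      rw [if_pos rfl]
      have hj_get : u[j]? = some k := by
        rw [← PySem.List.pyGet?_natCast]; exact hget
      have hu' : u = xs ++ (List.replicate n k ++ ys) := by rw [hu, List.append_assoc]
      have hlb : xs.length ≤ j := by
        rcases Nat.lt_or_ge j xs.length with hlt | hok
        · exact absurd (List.mem_of_getElem?
            (by rw [← List.getElem?_append_left hlt, ← hu']; exact hj_get)) hxs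
        · exact hok
      have hub : j < xs.length + n := by
        rcases Nat.lt_or_ge j (xs.length + n) with hok | hge
        · exact hok
        · exact absurd (List.mem_of_getElem? (by
            rw [← List.getElem?_append_right (by simp [List.length_replicate]; omega : (List.replicate n k).length ≤ j - xs.length),
              ← List.getElem?_append_right hlb, ← hu']
            exact hj_get)) hys
      have hn : 0 < n := by omega
      -- remove the first k (it sits at position xs.length), then insert k back at j: u is unchanged
      have hsplit : u = xs ++ k :: (List.replicate (n-1) k ++ ys) := by
        rw [hu', show List.replicate n k = k :: List.replicate (n-1) k by
          rw [← List.replicate_succ]; congr 1; omega]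
        simp
      have hrem : PySem.List.remove? u k = some (xs ++ List.replicate (n-1) k ++ ys) := by
        rw [hsplit, pvRemove_append _ _ _ hxs, List.append_assoc]
      rw [hrem]
      simp only [Option.getD_some]
      have hle : j ≤ (xs ++ List.replicate (n-1) k ++ ys).length := by
        simp [List.length_replicate]; omega
      rw [PySem.List.insert_natCast _ _ _ hle]
      have e1 : min (j - xs.length) (n-1) = j - xs.length := by omega
      have e2 : j - (xs.length + (n-1)) = 0 := by omega
      have hlen2 : (xs ++ List.replicate (n-1) k).length = xs.length + (n-1) := by
        simp [List.length_replicate]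
      have htake : List.take j (xs ++ List.replicate (n-1) k ++ ys)
          = xs ++ List.replicate (j - xs.length) k := by
        rw [List.take_append, List.take_append,
          List.take_of_length_le hlb, List.take_replicate, hlen2, e2, e1]
        simp
      have hdropj : List.drop j (xs ++ List.replicate (n-1) k ++ ys)
          = List.replicate (n-1-(j - xs.length)) k ++ ys := by
        rw [List.drop_append, List.drop_append,
          List.drop_eq_nil_of_le hlb, List.drop_replicate, hlen2, e2]
        simp
      rw [htake, hdropj, hu]
      have hrep : List.replicate (j - xs.length) k ++ k :: List.replicate (n-1-(j - xs.length)) k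
          = List.replicate n k := by
        rw [← List.replicate_succ, ← List.replicate_add]
        congr 1
        omega
      calc (xs ++ List.replicate (j - xs.length) k) ++ k :: (List.replicate (n-1-(j-xs.length)) k ++ ys)
          = xs ++ (List.replicate (j - xs.length) k ++ k :: List.replicate (n-1-(j-xs.length)) k) ++ ys := by
            simp [List.append_assoc]
        _ = xs ++ List.replicate n k ++ ys := by rw [hrep]
    · rw [if_neg hk]

theorem pvNotKey_of_nodup (pre suf : List (String × String)) (k v : String)
    (hnd : ((pre ++ (k, v) :: suf).map Prod.fst).Nodup) : ∀ q ∈ pre, q.1 ≠ k := by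
  intro q hq he
  rw [List.map_append, List.nodup_append] at hnd
  have h1 : k ∈ pre.map Prod.fst := he ▸ List.mem_map_of_mem hq
  have h2 : k ∈ ((k, v) :: suf).map Prod.fst := by simp
  exact hnd.2.2 k h1 k h2 rfl

theorem pvBridge (wb pre suf : List (String × String)) (k : String) (ws : List String)
    (hwb : wb = pre ++ (k, k) :: suf)
    (hnd : (wb.map Prod.fst).Nodup)
    (hnp : pvHasPat wb k ws = false) : ¬ pvPat (ws.map (pvChase pre)) k := by
  rintro ⟨p, m, q, h1, h2, h3, ⟨w, h4, h5⟩, h6⟩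
  have hkpre : ∀ r ∈ pre, r.1 ≠ k := pvNotKey_of_nodup pre suf k k (hwb ▸ hnd)
  rw [List.getElem?_map] at h3 h4 h6
  obtain ⟨wp, hwp, hwp2⟩ := Option.map_eq_some_iff.mp h3
  obtain ⟨wm, hwm, hwm2⟩ := Option.map_eq_some_iff.mp h4
  obtain ⟨wq, hwq, hwq2⟩ := Option.map_eq_some_iff.mp h6
  have hwm_ne : wm ≠ k := fun he =>
    h5 (by rw [← hwm2, he, pvChase_of_not_key pre k hkpre])
  have hcap : ∀ x : String, pvChase pre x = k → pvCap wb k x = true := by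
    intro x hx
    by_cases hxk : x = k
    · simp [pvCap, hxk]
    · obtain ⟨⟨q1, hq1, hq1e⟩, ⟨q2, hq2, hq2e⟩⟩ := pvChase_eq_of_ne pre x k hxk hx
      have hq1w : q1 ∈ wb := hwb ▸ List.mem_append_left _ hq1
      have hq2w : q2 ∈ wb := hwb ▸ List.mem_append_left _ hq2
      simp only [pvCap, Bool.or_eq_true, Bool.and_eq_true, List.any_eq_true]
      exact Or.inr ⟨⟨q1, hq1w, by simp [hq1e]⟩, ⟨q2, hq2w, by simp [hq2e.1, hq2e.2]⟩⟩
  have hm_lt : m < ws.length := List.getElem?_eq_some_iff.mp hwm |>.1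
  have htrue : pvHasPat wb k ws = true := by
    simp only [pvHasPat, List.any_eq_true]
    refine ⟨m, List.mem_range.mpr hm_lt, ?_⟩
    simp only [Bool.and_eq_true, bne_iff_ne]
    refine ⟨⟨?_, ?_⟩, ?_⟩
    · rw [List.getD_eq_getElem?_getD, hwm]
      exact hwm_ne
    · refine List.any_eq_true.mpr ⟨wp, ?_, hcap wp hwp2⟩
      exact List.mem_of_getElem? (by rw [List.getElem?_take_of_lt h1]; exact hwp)
    · refine List.any_eq_true.mpr ⟨wq, ?_, hcap wq hwq2⟩
      exact List.mem_of_getElem?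
        (by rw [List.getElem?_drop, show m + 1 + (q - (m+1)) = q by omega]; exact hwq)
  rw [htrue] at hnp
  exact absurd hnp (by simp)

theorem pvSub_self_id (k x : String) : pvSub k k x = x := by
  unfold pvSub; split <;> simp_all

theorem pvFold_go (wb : List (String × String)) (ws : List String)
    (hnd : (wb.map Prod.fst).Nodup)
    (hpat : ∀ p ∈ wb, p.1 = p.2 → pvHasPat wb p.1 ws = false) :
    ∀ (suf pre : List (String × String)), wb = pre ++ suf →
      suf.foldl (fun t kv => synPass kv.1 kv.2 t) (ws.map (pvChase pre)) = ws.map (pvChase wb) := by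
  intro suf
  induction suf with
  | nil =>
    intro pre hwb
    simp only [List.foldl_nil]
    rw [hwb, List.append_nil]
  | cons kv suf' ih =>
    intro pre hwb
    obtain ⟨k, v⟩ := kv
    rw [List.foldl_cons]
    by_cases hkv : v = k
    · subst hkv
      have hmem : (v, v) ∈ wb := hwb ▸ List.mem_append_right _ List.mem_cons_self
      have hnp : pvHasPat wb v ws = false := hpat (v, v) hmem rfl
      have hnopat : ¬ pvPat (ws.map (pvChase pre)) v := pvBridge wb pre suf' v ws hwb hnd hnp
      obtain ⟨xs, n, ys, he, hxs, hys⟩ := pvNoPat_decomp _ v hnopat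
      rw [he, synPass_id v xs ys n hxs hys, ← he]
      have hmapeq : ws.map (pvChase pre) = ws.map (pvChase (pre ++ [(v, v)])) := by
        refine List.map_congr_left (fun x _ => ?_)
        rw [pvChase_append_singleton, pvSub_self_id]
      rw [hmapeq]
      exact ih (pre ++ [(v, v)]) (by rw [hwb]; simp)
    · rw [synPass_map k v _ hkv, List.map_map]
      have hmapeq : ws.map (pvSub k v ∘ pvChase pre) = ws.map (pvChase (pre ++ [(k, v)])) := by
        refine List.map_congr_left (fun x _ => ?_)
        simp only [Function.comp_apply]
        rw [pvChase_append_singleton]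
      rw [hmapeq]
      exact ih (pre ++ [(k, v)]) (by rw [hwb]; simp)

theorem pvFold_eq_chase (wb : List (String × String)) (ws : List String)
    (hnd : (wb.map Prod.fst).Nodup)
    (hpat : ∀ p ∈ wb, p.1 = p.2 → pvHasPat wb p.1 ws = false) :
    wb.foldl (fun t kv => synPass kv.1 kv.2 t) ws = ws.map (pvChase wb) := by
  have h0 : ws.map (pvChase []) = ws := by
    simp [pvChase]
  have := pvFold_go wb ws hnd hpat wb [] (by simp)
  rw [h0] at this
  exact this

theorem pvDict_getD_eq_chase (wb : List (String × String)) (w : String) :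
    PySem.Dict.getD (wb.reverse.foldl
      (fun d kv => PySem.Dict.insert d kv.1 (PySem.Dict.getD d kv.2 kv.2))
      (PySem.Dict.empty : PySem.Dict String String)) w w = pvChase wb w := by
  rw [List.foldl_reverse]
  induction wb generalizing w with
  | nil => simp [pvChase, PySem.Dict.getD_empty]
  | cons kv rest ih =>
    obtain ⟨k, v⟩ := kv
    rw [List.foldr_cons]
    rw [PySem.Dict.getD_insert]
    by_cases hwk : w = k
    · rw [if_pos hwk, ih v]
      simp [pvChase, hwk]
    · rw [if_neg hwk, ih w]
      simp [pvChase, hwk]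

-- ===== VERDICT (by name: the statement is the Claim_ definition above) =====
theorem synoniemen_spec : Claim_equal_synoniemen := by
  intro tekst wb _hdom hpre
  rcases hpre with ⟨hnd, hpat⟩
  show synoniemen tekst wb = synoniemen_alt tekst wb
  change PySem.Str.join " " (List.foldl (fun t kv => synPass kv.1 kv.2 t)
      ((PySem.Str.split? tekst " ").getD [tekst]) wb)
    = PySem.Str.join " " (List.map (fun w => PySem.Dict.getD
        (List.foldl (fun d kv => PySem.Dict.insert d kv.1 (PySem.Dict.getD d kv.2 kv.2))
          PySem.Dict.empty wb.reverse) w w)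
        ((PySem.Str.split? tekst " ").getD [tekst]))
  rw [pvFold_eq_chase wb _ hnd hpat]
  exact congrArg (PySem.Str.join " ")
    (List.map_congr_left (fun w _ => (pvDict_getD_eq_chase wb w).symm))
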